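-- pv_equiv track=rewrite | github.com/iplweb/django-bpp | src/import_dbf/util.py | exp_combine
-- ===== SOURCE A (Python) =====
-- def exp_combine(a, b, sep=", "):
--     ret = ""
--     if a:
--         ret = a
--
--     if b:
--         if ret:
--             ret += sep
--         ret += b
--
--     while ret.find("  ") >= 0:
--         ret = ret.replace("  ", " ")
--     return ret
-- ===== SOURCE B (Python) =====
-- def exp_combine(a, b, sep=", "):
--     ret = a if a else ""
--     if b:
--         if ret:
--             ret += sep
--         ret += b
--     out = []
--     prev_space = False
--     for c in ret:
--         if c == " " and prev_space:
--             continue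
--         out.append(c)
--         prev_space = c == " "
--     return "".join(out)
-- ===== Notes on version B (the rewrite author's own statement) =====
-- stated objective: alternative
-- what changed: Replaces the fixpoint while-loop of repeated str.replace(' ',' ') passes with a single left-to-right scan that drops a space whenever the previously kept character was a space.
import Mathlib
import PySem

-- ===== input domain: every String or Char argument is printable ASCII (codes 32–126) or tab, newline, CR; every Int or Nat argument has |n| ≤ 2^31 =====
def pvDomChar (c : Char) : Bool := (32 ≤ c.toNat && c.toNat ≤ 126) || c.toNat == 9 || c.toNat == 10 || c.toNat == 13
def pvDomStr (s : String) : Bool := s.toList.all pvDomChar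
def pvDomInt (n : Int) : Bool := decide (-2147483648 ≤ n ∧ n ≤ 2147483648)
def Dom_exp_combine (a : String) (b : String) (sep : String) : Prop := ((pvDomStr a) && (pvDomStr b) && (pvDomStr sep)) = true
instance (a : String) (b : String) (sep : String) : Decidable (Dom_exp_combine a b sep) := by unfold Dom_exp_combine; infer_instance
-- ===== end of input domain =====

-- B replaces A's repeated str.replace("  ", " ") fixpoint loop with one linear scan that
-- skips a space whose previously kept character was a space (alternative decomposition).


-- ===== PORT A =====
-- One replace("  ", " ") pass as plain recursion; it and the lemmas up to pvRep1_length_lt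
-- exist only because port A's while-loop needs them for termination (each pass on a string
-- containing "  " strictly shrinks it).
def pvRep1 : List Char → List Char
  | ' ' :: ' ' :: t => ' ' :: pvRep1 t
  | c :: t => c :: pvRep1 t
  | [] => []

theorem pvPrefix_iff (c : Char) (t : List Char) :
    [' ',' '].isPrefixOf (c :: t) = true ↔ ∃ t', c = ' ' ∧ t = ' ' :: t' := by
  rw [List.isPrefixOf_iff_prefix]
  constructor
  · rintro ⟨u, hu⟩
    simp only [List.cons_append, List.nil_append, List.cons.injEq] at hu
    exact ⟨u, hu.1.symm, hu.2.symm⟩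
  · rintro ⟨t', rfl, rfl⟩
    exact ⟨t', rfl⟩

theorem pvRep1_cons (c : Char) (t : List Char) (h : ¬ [' ',' '].isPrefixOf (c :: t) = true) :
    pvRep1 (c :: t) = c :: pvRep1 t := by
  rw [pvRep1]
  intro t' hc ht
  exact h ((pvPrefix_iff c t).mpr ⟨t', hc, ht⟩)

theorem pvReplaceGo_eq_rep1 (fuel : Nat) (l acc : List Char) (h : l.length ≤ fuel) :
    PySem.Chars.replace.go [' ', ' '] [' '] fuel l acc = acc.reverse ++ pvRep1 l := by
  induction fuel generalizing l acc with
  | zero =>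
    have : l = [] := by cases l <;> simp_all
    subst this; simp [PySem.Chars.replace.go, pvRep1]
  | succ n ih =>
    cases l with
    | nil => simp [PySem.Chars.replace.go, pvRep1]
    | cons c t =>
      rw [PySem.Chars.replace.go]
      by_cases hp : [' ',' '].isPrefixOf (c :: t) = true
      · obtain ⟨t', rfl, rfl⟩ := (pvPrefix_iff c t).mp hp
        rw [if_pos hp]
        simp only [List.length_cons, List.drop_succ_cons, List.length_nil, Nat.zero_add, List.drop]
        rw [ih t' _ (by simp at h ⊢; omega)]
        simp [pvRep1]
      · rw [if_neg hp]
        rw [ih t _ (by simp at h; omega), pvRep1_cons c t hp]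
        simp

theorem pvReplace_eq_rep1 (l : List Char) :
    PySem.Chars.replace l [' ', ' '] [' '] = pvRep1 l := by
  rw [PySem.Chars.replace, if_neg (by simp)]
  simpa using pvReplaceGo_eq_rep1 l.length l [] le_rfl

theorem pvRep1_length_le (l : List Char) : (pvRep1 l).length ≤ l.length := by
  induction l using pvRep1.induct with
  | case1 t ih => simp [pvRep1]; omega
  | case2 c t hne ih =>
    rw [pvRep1_cons c t (fun hp => by
      obtain ⟨t', hc, ht⟩ := (pvPrefix_iff c t).mp hp; exact hne t' hc ht)]
    simpa using ih
  | case3 => simp [pvRep1]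

theorem pvRep1_length_lt (l : List Char) (h : [' ', ' '] <:+: l) :
    (pvRep1 l).length < l.length := by
  induction l using pvRep1.induct with
  | case1 t ih =>
    simp [pvRep1]
    have := pvRep1_length_le t; omega
  | case2 c t hne ih =>
    have hp : ¬ [' ',' '].isPrefixOf (c :: t) = true := fun hp => by
      obtain ⟨t', hc, ht⟩ := (pvPrefix_iff c t).mp hp; exact hne t' hc ht
    rw [pvRep1_cons c t hp]
    have ht : [' ',' '] <:+: t := by
      rcases List.infix_cons_iff.mp h with hpre | ht
      · exact absurd (List.isPrefixOf_iff_prefix.mpr hpre) hp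
      · exact ht
    simpa using ih ht
  | case3 => simp at h

-- while ret.find("  ") >= 0: ret = ret.replace("  ", " ")
def pvLoopA (ret : List Char) : List Char :=
  if 0 ≤ PySem.Chars.find ret [' ', ' '] then
    pvLoopA (PySem.Chars.replace ret [' ', ' '] [' '])
  else ret
termination_by ret.length
decreasing_by
  rename_i h
  rw [pvReplace_eq_rep1]
  exact pvRep1_length_lt ret ((PySem.Chars.find_nonneg_iff ret [' ', ' ']).mp h)

def exp_combine (a : String) (b : String) (sep : String) : String :=
  let ret : List Char := []
  let ret := if a.toList ≠ [] then a.toList else ret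
  let ret := if b.toList ≠ [] then (if ret ≠ [] then ret ++ sep.toList else ret) ++ b.toList else ret
  String.ofList (pvLoopA ret)

-- ===== PORT B =====
def exp_combine_alt (a : String) (b : String) (sep : String) : String :=
  let ret : List Char := []
  let ret := if a.toList ≠ [] then a.toList else ret
  let ret := if b.toList ≠ [] then (if ret ≠ [] then ret ++ sep.toList else ret) ++ b.toList else ret
  let st := ret.foldl
    (fun (st : List Char × Bool) c =>
      if c = ' ' ∧ st.2 then st else (st.1 ++ [c], c = ' '))
    ([], false)
  String.ofList st.1

-- ===== PRECONDITION & SPEC =====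
def Spec_exp_combine (a : String) (b : String) (sep : String) (out : String) : Prop := out = exp_combine_alt a b sep
instance (a : String) (b : String) (sep : String) (out : String) : Decidable (Spec_exp_combine a b sep out) := by unfold Spec_exp_combine; infer_instance

-- ===== CLAIM (what is proved, stated in full; the proofs are below) =====
def Claim_equal_exp_combine : Prop := ∀ (a : String) (b : String) (sep : String), Dom_exp_combine a b sep → Spec_exp_combine a b sep (exp_combine a b sep)

-- ===== LEMMAS AND PROOFS =====
-- The one-pass collapse as plain recursion: the proof-side model of B's fold.
def pvCollapse : List Char → Bool → List Char
  | [], _ => []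
  | c :: t, prev => if c = ' ' ∧ prev then pvCollapse t true else c :: pvCollapse t (c = ' ')

theorem pvFoldl_collapse (l : List Char) : ∀ (acc : List Char) (prev : Bool),
    (l.foldl (fun (st : List Char × Bool) c =>
        if c = ' ' ∧ st.2 then st else (st.1 ++ [c], c = ' ')) (acc, prev)).1
      = acc ++ pvCollapse l prev := by
  induction l with
  | nil => intro acc prev; simp [pvCollapse]
  | cons c t ih =>
    intro acc prev
    simp only [List.foldl_cons]
    by_cases hc : c = ' ' ∧ prev = true
    · obtain ⟨rfl, rfl⟩ := hc
      rw [if_pos (by simp), ih acc true]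
      simp [pvCollapse]
    · rw [if_neg (by simpa using hc), ih]
      rw [pvCollapse, if_neg (by simpa using hc)]
      simp

theorem pvCollapse_rep1 (l : List Char) : ∀ prev, pvCollapse (pvRep1 l) prev = pvCollapse l prev := by
  induction l using pvRep1.induct with
  | case1 t ih =>
    intro prev
    rw [pvRep1]
    cases prev with
    | true => simp [pvCollapse, ih]
    | false => simp [pvCollapse, ih]
  | case2 c t hne ih =>
    intro prev
    rw [pvRep1_cons c t (fun hp => by
      obtain ⟨t', hc, ht⟩ := (pvPrefix_iff c t).mp hp; exact hne t' hc ht)]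
    by_cases hc : c = ' ' ∧ prev = true
    · obtain ⟨rfl, rfl⟩ := hc
      simp [pvCollapse, ih]
    · rw [pvCollapse, if_neg (by simpa using hc), pvCollapse, if_neg (by simpa using hc), ih]
  | case3 => intro prev; rw [pvRep1]

theorem pvCollapse_id (l : List Char) : ∀ prev, ¬ ([' ', ' '] <:+: l) →
    (prev = true → l.head? ≠ some ' ') → pvCollapse l prev = l := by
  induction l with
  | nil => intro prev _ _; rfl
  | cons c t ih =>
    intro prev hinf hhd
    have hc : ¬ (c = ' ' ∧ prev = true) := by
      rintro ⟨rfl, rfl⟩; exact hhd rfl rfl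
    rw [pvCollapse, if_neg (by simpa using hc)]
    have htinf : ¬ ([' ',' '] <:+: t) := fun h => hinf (h.trans (List.suffix_cons c t).isInfix)
    congr 1
    apply ih _ htinf
    intro hsp hhd'
    cases t with
    | nil => simp at hhd'
    | cons d t' =>
      simp at hhd'
      have hc' : c = ' ' := by simpa using hsp
      subst hc'; subst hhd'
      exact hinf ⟨[], t', by simp⟩

theorem pvLoopA_eq_collapse (l : List Char) : pvLoopA l = pvCollapse l false := by
  induction l using pvLoopA.induct with
  | case1 l h ih =>
    rw [pvLoopA, if_pos h, ih, pvReplace_eq_rep1, pvCollapse_rep1]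
  | case2 l h =>
    rw [pvLoopA, if_neg h]
    exact (pvCollapse_id l false (fun hinf =>
      h ((PySem.Chars.find_nonneg_iff l [' ', ' ']).mpr hinf)) (by simp)).symm

-- ===== VERDICT (by name: the statement is the Claim_ definition above) =====
theorem exp_combine_spec : Claim_equal_exp_combine := by
  intro a b sep _
  show _ = _
  simp only [exp_combine, exp_combine_alt, pvLoopA_eq_collapse, pvFoldl_collapse, List.nil_append]
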